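/- GENERATED by mk_final_copies.py from the proof of the farm's unit `inverse_mdct.6` (farm:inverse_mdct.6.1: Proof.lean) as the
   re-elaboration sweep compiled it — do not edit. -/
/-
  Unit inverse_mdct.6: the first `l` loop of step 3 (stb_vorbis_fixed.c:2777-2782), 0x109826 … 0x1098ab.

      10986b  L5: mov eax,[rbp-60H] ; sub eax,4 ; sar eax,1 ; cmp eax,r15d ; jle X      for (; l < (ld-3)>>1; ++l)
      109878      k0 = n >> (l+2) (r13d), k0_2 = k0 >> 1 (r14d), lim = 1 << (l+1) (r12d), i = 0 (ebx), d[rbp-58H] = l+1 ; jmp L4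
      109826  B:  imdct_step3_inner_r_loop(n >> (l+4), u, n2-1 - k0*i, -k0_2, A, 1 << (l+3)) ; add ebx,1
      109860  L4: cmp ebx,r12d ; jl B ; mov ecx,[rbp-58H] ; mov r15d,ecx  (falls into L5)
      1098a0  X:  d[rbp-80H] = d[rbp-48H] ; mov edi,r15d ; jmp 1098f2  (= loop7, the exit)

  Two step lemmas, each ONE walk from a loop head to the next cut (`outer_step` from `loop5`, `inner_step` from `loop4`), and two
  inductions on the measures `lim l − i` and `lmid k − l` that chain them (`inner_loop`, `outer_loop`). The invariants `Outer`,
  `Inner` and the frame rule `seg6_carry` are in Lemmas.lean.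
-/
import Asan.CheckWalk
import Vorbis.Spec.MdctUse
import Vorbis.Spec.Units.inverse_mdct_6
import Vorbis.Spec.Worked.inverse_mdct_6_Lemmas

open X86 X86.User Asan Vorbis Vorbis.Spec

set_option maxRecDepth 4000
set_option maxHeartbeats 4000000

namespace Vorbis.Spec.inverse_mdct_6
open Vorbis.Spec.inverse_mdct

/-- The guard of the outer loop as the machine computes it (`(ilog − 4) >> 1`, signed) is `(ld − 3) / 2`. -/
theorem guard_toInt (k : Nat) (h6 : 6 ≤ k) (h13 : k ≤ 13) :
    ((BitVec.ofNat 32 (k + 1) - 4#32).sshiftRight 1).toInt = (((k - 3) / 2 : Nat) : Int) := by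
  have hk : k = 6 ∨ k = 7 ∨ k = 8 ∨ k = 9 ∨ k = 10 ∨ k = 11 ∨ k = 12 ∨ k = 13 := by omega
  rcases hk with rfl | rfl | rfl | rfl | rfl | rfl | rfl | rfl <;> decide

/-- `lea r32, [r15 + d]` for `r15d = l`: `l + d`, when nothing wraps. -/
theorem lea_toNat (l : Nat) (d : Word) (dn : Nat) (hd : d.toNat = dn) (h : l + dn < 2 ^ 32) :
    (BitVec.setWidth 32 (Word.ofBV (BitVec.ofNat 32 l) + d).toBitVec).toNat = l + dn := by
  rw [BitVec.toNat_setWidth, UInt64.toNat_toBitVec, UInt64.toNat_add, toNat_ofBV32, BitVec.toNat_ofNat, hd]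
  omega

/-- **One round of the outer loop's head** (0x10986b, line 2777): from `loop5` with the invariant at `l`, either the guard fails —
then `l = lmid k`, and the exit block (0x1098a0: `d[rbp-80H] := n >> 5`, `edi := l`) leads to `loop7` with the exit assertion
`At7` — or it holds, and the set-up of the round (line 2778-2781) leads to the inner head `loop4` with `i = 0`. -/
theorem outer_step (Lay : Layout) (hLay : Lay.hi = 0x1000000) (μ : Microarch) (hμ : UserX.MicroOK μ) (u₀ : State)
    (hcode : HasCodeNat Lay u₀ Vorbis.L.inverse_mdct.entry Vorbis.Code.code_inverse_mdct.nat Vorbis.L.inverse_mdct.size)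
    (others : List Obj) (frames : List (Nat × FrameLayout)) (len : Nat) (A : Arena) (stored room : Int) (ysz : Nat → Nat)
    (k c : Nat) (ue : State) (ret : Word) (l : Nat) (v : State)
    (ho : Outer u₀ others frames len A stored room ysz k c ue ret l v) :
    ReachVia Lay μ WayInv v (fun w => At7 u₀ others frames len A stored room ysz k c ue ret w ∨
      Inner u₀ others frames len A stored room ysz k c ue ret l 0 w) := by
  obtain ⟨c_rip, hb, hf, c_r15, hlo, hhi⟩ := ho
  have he := hb.entry
  v_entry he
  have c_rsp := hb.rsp
  have c_rbp := hb.rbp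
  have w_eq : Mem.EqOn Vorbis.L.textLo Vorbis.L.textHi u₀.mem v.mem := hb.code
  have hdf : v.flags .df = false := (show abiInv _ from hb.abi).1
  have hmx : v.mxcsr &&& 0x1F80 = 0x1F80 := (show abiInv _ from hb.abi).2
  have hsse := Vorbis.sseOK_of_abiInv hb.abi
  -- the slots the walk loads
  have q_ilog := hf.ilogSlot
  have q_n := hf.nSlot
  have q_n32 := hf.n32Slot
  -- the arithmetic of the sizes
  have hld := hb.pre.ld
  have hfacts := hld.isBlocksize.facts
  have h6 := hld.ge
  have h13 := hld.le
  u_walk hcode [hμ.vendor] until [Vorbis.L.inverse_mdct.loop4, Vorbis.L.inverse_mdct.loop7] span [Vorbis.L.textLo, Vorbis.L.textHi] side (v_side)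
  · -- 0x1098a0 … 0x1098ab → `loop7` (0x1098f2): the guard failed, the exit block was walked
    have hl31 : l < 2 ^ 31 := by
      have : Mdct.lmid k ≤ 5 := by
        unfold Mdct.lmid
        omega
      omega
    have hg : ¬ l < (k - 3) / 2 := by
      rw [guard_toInt k h6 h13, toInt_ofNat l hl31] at hbr_109876
      omega
    have hl : l = Mdct.lmid k := Mdct.first_exit hlo hhi hg
    have hk : Mem.SameExcept
        [⟨(ue.reg .rsp).toNat - 368, (ue.reg .rsp).toNat - 184⟩,
         ⟨(ue.reg .rsp).toNat - 136, (ue.reg .rsp).toNat - 132⟩,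
         ⟨(ue.reg .rsp).toNat - 96, (ue.reg .rsp).toNat - 92⟩,
         ⟨buf ue, buf ue + 4 * (n ue / 2)⟩] v.mem s_1098ab.mem := by
      u_same
    have hrbp : s_1098ab.reg .rbp = ue.reg .rsp - 8 := by
      rw [w_kept .rbp rfl]
      exact c_rbp
    have hrsp : s_1098ab.reg .rsp = ue.reg .rsp - 184 := by
      rw [w_kept .rsp rfl]
      exact c_rsp
    have habi : abiInv s_1098ab := by v_inv
    obtain ⟨hb', hf'⟩ := seg6_carry hb hf hk w_eq habi hrbp hrsp
    -- `d[rbp-80H] = n >> 5`: the value stored at 0x1098a4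
    have hn32 : s_1098ab.mem.readLE (ue.reg .rsp - 136) 4 = n ue / 32 := by
      rw [w_mem, Mem.readLE_writeLE_same _ _ _ _ (by decide), toNat_ofNat32 _ (by omega)]
      omega
    -- `edi = l = lmid k`
    have hrdi : (s_1098ab.reg .rdi).toNat = Mdct.lmid k := by
      rw [w_rdi, toNat_ofBV32, toNat_ofNat32 _ (by omega), hl]
    refine ReachVia.done (Or.inl ?_)
    exact
      { rip := w_rip
        body := hb'
        sBuf := ⟨hf'.uSlot, hf'.nSlot, hf'.uMidSlot⟩
        sA := ⟨hf'.aSlot, hf'.n2Slot, hf'.n2x4Slot, hf'.n8Slot⟩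
        sS2 := ⟨hf'.n2x4m32Slot, hf'.n4x4Slot⟩
        s3 := ⟨hf'.ilogSlot, hf'.n2m1Slot⟩
        n32Slot := hn32
        rdi := hrdi }
  · -- 0x109878 … 0x10989e → `loop4` (0x109860): the guard holds, the round's constants are set up, `i = 0`
    have hl31 : l < 2 ^ 31 := by
      have : Mdct.lmid k ≤ 5 := by
        unfold Mdct.lmid
        omega
      omega
    have hg : l < (k - 3) / 2 := by
      rw [guard_toInt k h6 h13, toInt_ofNat l hl31] at hbr_109876
      omega
    have hin : Mdct.InFirst k l := ⟨hlo, hg⟩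
    have hcnt := (Mdct.Call.firstL hld hin).counts
    have hn31 : n ue < 2 ^ 31 := by omega
    have hk031 : n ue >>> (l + 2) < 2 ^ 31 := by
      have : n ue >>> (l + 2) ≤ n ue := by
        rw [Nat.shiftRight_eq_div_pow]
        exact Nat.div_le_self _ _
      omega
    have hk : Mem.SameExcept
        [⟨(ue.reg .rsp).toNat - 368, (ue.reg .rsp).toNat - 184⟩,
         ⟨(ue.reg .rsp).toNat - 136, (ue.reg .rsp).toNat - 132⟩,
         ⟨(ue.reg .rsp).toNat - 96, (ue.reg .rsp).toNat - 92⟩,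
         ⟨buf ue, buf ue + 4 * (n ue / 2)⟩] v.mem s_10989e.mem := by
      u_same
    have hrbp : s_10989e.reg .rbp = ue.reg .rsp - 8 := by
      rw [w_kept .rbp rfl]
      exact c_rbp
    have hrsp : s_10989e.reg .rsp = ue.reg .rsp - 184 := by
      rw [w_kept .rsp rfl]
      exact c_rsp
    have habi : abiInv s_10989e := by v_inv
    obtain ⟨hb', hf'⟩ := seg6_carry hb hf hk w_eq habi hrbp hrsp
    -- `d[rbp-58H] = l + 1`: the value stored at 0x10989b
    have hl1 : s_10989e.mem.readLE (ue.reg .rsp - 96) 4 = l + 1 := by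
      rw [w_mem, Mem.readLE_writeLE_same _ _ _ _ (by decide), lea_toNat l 1 1 rfl (by omega)]
      omega
    refine ReachVia.done (Or.inr ?_)
    refine
      { rip := w_rip
        body := hb'
        fixed := hf'
        guard := hin
        ile := Nat.zero_le _
        l1Slot := hl1
        r15 := ?_
        rbx := ?_
        r12 := ?_
        r13 := ?_
        r14 := ?_ }
    · -- r15 is not written
      rw [w_kept .r15 rfl]
      exact c_r15
    · -- `mov ebx, 0` (`rw` closes `Word.ofBV 0#32 = Word.ofBV (BitVec.ofNat 32 0)` by `rfl`)
      rw [w_rbx]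
    · -- `lim = 1 << (l + 1)`
      rw [w_r12, count_eq l 1 1 rfl (by omega), shl_one _ (by omega)]
      rfl
    · -- `k0 = n >> (l + 2)`
      rw [w_r13, count_eq l 2 2 rfl (by omega), sar_ofNat _ _ hn31]
      rfl
    · -- `k0_2 = k0 >> 1`
      rw [w_r14, count_eq l 2 2 rfl (by omega), sar_ofNat _ _ hn31, sar_ofNat _ 1 hk031]
      rfl

/-- `add ebx, 1` of a counter given as a number. -/
theorem ofNat_add_one (i : Nat) : BitVec.ofNat 32 i + 1#32 = BitVec.ofNat 32 (i + 1) := by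
  apply BitVec.eq_of_toNat_eq
  simp only [BitVec.toNat_add, BitVec.toNat_ofNat]
  omega

/-- A right shift does not make a number larger. -/
theorem shr_le (a s : Nat) : a >>> s ≤ a := by
  rw [Nat.shiftRight_eq_div_pow]
  exact Nat.div_le_self _ _

/-- **One round of the inner loop's head** (0x109860, line 2781): from `loop4` with the invariant at `(l, i)`, either `i < lim` —
then the body (0x109826: the call `imdct_step3_inner_r_loop(n >> (l+4), u, n2-1 - k0*i, -k0_2, A, 1 << (l+3))`, whose precondition
is `pre_of_call_first`, and `++i`) leads back to `loop4` with `i + 1` — or `i = lim`, and `l := d[rbp-58H] = l + 1` leads to the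
outer head `loop5` with `l + 1`. -/
theorem inner_step (Lay : Layout) (hLay : Lay.hi = 0x1000000) (μ : Microarch) (hμ : UserX.MicroOK μ) (u₀ : State)
    (hcode : HasCodeNat Lay u₀ Vorbis.L.inverse_mdct.entry Vorbis.Code.code_inverse_mdct.nat Vorbis.L.inverse_mdct.size)
    (h_r : ∀ (others : List Obj) (frames : List (Nat × FrameLayout)) (len i0 koff k1 : Nat),
      Calls Lay μ Vorbis.WayInv (Vorbis.conv u₀) Vorbis.L.imdct_step3_inner_r_loop.entry
        (Vorbis.Spec.imdct_step3_inner_r_loop.spec others frames len i0 koff k1))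
    (others : List Obj) (frames : List (Nat × FrameLayout)) (len : Nat) (A : Arena) (stored room : Int) (ysz : Nat → Nat)
    (k c : Nat) (ue : State) (ret : Word) (l i : Nat) (v : State)
    (hi : Inner u₀ others frames len A stored room ysz k c ue ret l i v) :
    ReachVia Lay μ WayInv v (fun w => Inner u₀ others frames len A stored room ysz k c ue ret l (i + 1) w ∨
      Outer u₀ others frames len A stored room ysz k c ue ret (l + 1) w) := by
  obtain ⟨c_rip, hb, hf, hin, hile, q_l1, c_r15, c_rbx, c_r12, c_r13, c_r14⟩ := hi
  have he := hb.entry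
  v_entry he
  have c_rsp := hb.rsp
  have c_rbp := hb.rbp
  have w_eq : Mem.EqOn Vorbis.L.textLo Vorbis.L.textHi u₀.mem v.mem := hb.code
  have hdf : v.flags .df = false := (show abiInv _ from hb.abi).1
  have hmx : v.mxcsr &&& 0x1F80 = 0x1F80 := (show abiInv _ from hb.abi).2
  have hsse := Vorbis.sseOK_of_abiInv hb.abi
  -- the slots the walk loads
  have q_n2m1 := hf.n2m1Slot
  have q_n := hf.nSlot
  have q_tab := hf.aSlot
  have q_u := hf.uSlot
  -- the arithmetic of the sizes and of the round
  have hp := hb.pre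
  have hld := hp.ld
  have hfacts := hld.isBlocksize.facts
  have hc := Mdct.Call.firstL hld hin
  have hcnt := hc.counts
  have hlim := hc.lim_le
  have hn31 : n ue < 2 ^ 31 := by omega
  -- where the sample buffer is: off the stack region
  have hnle := hp.n_le
  have hoS := hp.offStack _ hp.buf_blk
  simp only [] at hoS
  -- the callee's contract, instantiated (live objects: the temp block is one more)
  have hcal := h_r (A.newTempObj (2 * n ue) :: others) frames (n ue / 2) (n ue / 2 - 1 - Mdct.k0 (n ue) l * i)
    (Mdct.k02 (n ue) l) (Mdct.k1 l)
  u_walk hcode [hμ.vendor] until [Vorbis.L.inverse_mdct.loop4, Vorbis.L.inverse_mdct.loop5] span [Vorbis.L.textLo, Vorbis.L.textHi] side (v_side)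
  case call_inv =>
    -- 0x109858: DF and the MXCSR masks at the callee's entry
    v_inv
  case pre_109858 =>
    -- 0x109858: the callee's precondition, `pre_of_call_first`
    have hilt : i < Mdct.lim l := by
      rw [toInt_ofNat i (by omega), toInt_ofNat _ (by omega)] at hbr_109863
      omega
    have hci := (Mdct.Call.firstL_call hld hin hilt).1
    have hk0 : 32 ≤ Mdct.k0 (n ue) l := by
      have h1 := hc.m_ge
      have h2 := hc.cnt
      have h3 := hc.half
      omega
    have hk0le : Mdct.k0 (n ue) l ≤ n ue := shr_le _ _
    have hk02 : Mdct.k02 (n ue) l ≤ n ue := by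
      have h3 := hc.half
      omega
    have hk02pos : 1 ≤ Mdct.k02 (n ue) l := by
      have h1 := hc.m_ge
      have h2 := hc.cnt
      omega
    -- the shadow clause: the layer of `Body.shadow` at the steady rsp, no shadow byte written by the push
    have hun : ShadowUntouched v.mem s_109858.mem := by v_untouched
    have hsh : ShadowPre (A.newTempObj (2 * n ue) :: others) frames s_109858 := by
      refine ⟨?_, ?_⟩
      · have e : (s_109858.reg .rsp).toNat + 8 = (ue.reg .rsp).toNat - 184 := by
          rw [w_rsp]
          u_omega
        rw [e]
        exact hb.shadow.untouched hun
      · intro o ho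
        rcases List.mem_cons.mp ho with rfl | ho
        · have := hp.arenaText
          unfold Arena.newTempObj Arena.tempObj
          simp only
          omega
        · exact hp.shadow.offText o ho
    -- the two live ranges: `u[0 .. n2)` inside the channel buffer, the table `A`
    have hu : LiveBytes (A.newTempObj (2 * n ue) :: others) frames (buf ue) (4 * (n ue / 2)) := by
      refine LiveBytes.of_block (hp.blkLive _ _ hp.buf_blk) (Nat.le_refl _) ?_
      simp only []
      omega
    have hA : LiveBytes (A.newTempObj (2 * n ue) :: others) frames (tabA ue) (2 * n ue) :=
      LiveBytes.of_block (hp.blkLive _ _ hp.tabA_blk) (Nat.le_refl _) (Nat.le_refl _)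
    have hAin := hp.ok.inside _ hp.tabA_blk
    simp only [] at hAin
    -- the six arguments as numbers
    have hrdi : arg32 s_109858 .rdi = n ue >>> (l + 4) := by
      have := shr_le (n ue) (l + 4)
      rw [arg32_def, w_rdi, count_eq l 4 4 rfl (by omega), sar_ofNat _ _ hn31, toNat_ofBV32, toNat_ofNat32 _ (by omega)]
      exact Nat.mod_eq_of_lt (by omega)
    have hrsi : (s_109858.reg .rsi).toNat = buf ue := by
      rw [w_rsi, buf_def]
    have hrdx : arg32 s_109858 .rdx = n ue / 2 - 1 - Mdct.k0 (n ue) l * i := by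
      rw [arg32_def, w_rdx, toNat_ofBV32, sub_mul_toNat _ _ _ (by omega) (by omega)]
      exact Nat.mod_eq_of_lt (by omega)
    have hrcx : IsNeg32 s_109858 .rcx (Mdct.k02 (n ue) l) := by
      refine ⟨hk02pos, by omega, ?_⟩
      rw [arg32_def, w_rcx, toNat_ofBV32, neg_toNat _ hk02pos (by omega)]
      exact Nat.mod_eq_of_lt (by omega)
    have hr8 : (s_109858.reg .r8).toNat = tabA ue := by
      rw [w_r8]
      exact X86.User.toNat_ofNat_lt' _ (by omega)
    have hr9 : arg32 s_109858 .r9 = Mdct.k1 l := by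
      have hp2 : 2 ^ (l + 3) ≤ 2 ^ 9 := Nat.pow_le_pow_right (by decide) (by omega)
      unfold Mdct.k1
      rw [arg32_def, w_r9, count_eq l 3 3 rfl (by omega), shl_one _ (by omega), toNat_ofBV32, Nat.shiftLeft_eq, Nat.one_mul,
        toNat_ofNat32 _ (by omega)]
      exact Nat.mod_eq_of_lt (by omega)
    exact imdct_step3_inner_r_loop.pre_of_call_first hld hin hilt hsh hu hA hrdi hrsi hrdx hrcx hr8 hr9
  · -- 0x10985d, after the call: `add ebx, 1`, back to `loop4` with `i + 1`
    have hilt : i < Mdct.lim l := by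
      rw [toInt_ofNat i (by omega), toInt_ofNat _ (by omega)] at hbr_109863
      omega
    have hci := (Mdct.Call.firstL_call hld hin hilt).1
    -- the returned state, restated for the next walk (what `v_after_call` does, with `quarter` kept folded)
    have w_eq := Vorbis.conv_code_eqOn w_code
    have w_df := (show X86.User.abiInv _ from w_inv).1
    have w_mx := (show X86.User.abiInv _ from w_inv).2
    have w_sse := Vorbis.sseOK_of_abiInv w_inv
    -- the callee's footprint as numbers: its iteration count is `rlim`
    have hq : quarter s_109858 = Mdct.rlim (n ue) l := by
      have := shr_le (n ue) (l + 4)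
      rw [quarter_def, w_rdi_109858, count_eq l 4 4 rfl (by omega), sar_ofNat _ _ hn31, toNat_ofBV32,
        toNat_ofNat32 _ (by omega), Nat.mod_eq_of_lt (by omega), ← hc.m_eq, Nat.shiftRight_eq_div_pow (n ue >>> (l + 4)) 2]
    simp only [X86.User.Spec.footprint, imdct_step3_inner_r_loop.spec_frame, imdct_step3_inner_r_loop.spec_writes,
      w_rsp_109858, w_rsi_109858] at w_same
    rw [hq, w_mem_109858] at w_same
    -- what the round wrote: the callee's frame below the steady rsp, floats of `u[0 .. n2)`
    have hk2 : Mem.SameExcept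
        [⟨(ue.reg .rsp).toNat - 368, (ue.reg .rsp).toNat - 184⟩,
         ⟨buf ue, buf ue + 4 * (n ue / 2)⟩] v.mem s_109858r.mem := by
      rw [buf_def]
      u_same
    have hl1r : s_109858r.mem.readLE (ue.reg .rsp - 96) 4 = l + 1 := by
      rw [buf_def] at hk2 hoS
      u_frame q_l1
    u_walk hcode [hμ.vendor] until [Vorbis.L.inverse_mdct.loop4, Vorbis.L.inverse_mdct.loop5] span [Vorbis.L.textLo, Vorbis.L.textHi] side (v_side)
    -- `loop4` again: the invariant at `(l, i + 1)`
    have hk : Mem.SameExcept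
        [⟨(ue.reg .rsp).toNat - 368, (ue.reg .rsp).toNat - 184⟩,
         ⟨(ue.reg .rsp).toNat - 136, (ue.reg .rsp).toNat - 132⟩,
         ⟨(ue.reg .rsp).toNat - 96, (ue.reg .rsp).toNat - 92⟩,
         ⟨buf ue, buf ue + 4 * (n ue / 2)⟩] v.mem s_10985d.mem := by
      rw [w_mem]
      apply hk2.mono
      intro x hx a ha1 ha2
      simp only [List.mem_cons, List.mem_nil_iff, or_false] at hx
      rcases hx with rfl | rfl
      · exact ⟨_, List.mem_cons_self, ha1, ha2⟩
      · exact ⟨_, List.mem_cons_of_mem _ (List.mem_cons_of_mem _ (List.mem_cons_of_mem _ List.mem_cons_self)), ha1, ha2⟩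
    have hrbp : s_10985d.reg .rbp = ue.reg .rsp - 8 := by
      rw [w_kept .rbp rfl]
      exact c_rbp
    have habi : abiInv s_10985d := by v_inv
    obtain ⟨hb', hf'⟩ := seg6_carry hb hf hk w_eq habi hrbp w_rsp
    refine ReachVia.done (Or.inl ?_)
    refine
      { rip := w_rip
        body := hb'
        fixed := hf'
        guard := hin
        ile := hilt
        l1Slot := ?_
        r15 := ?_
        rbx := ?_
        r12 := ?_
        r13 := ?_
        r14 := ?_ }
    · -- `d[rbp-58H]`: not written by the callee
      rw [w_mem]
      exact hl1r
    · -- r15, r12, r13, r14: callee-saved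
      rw [w_kept .r15 rfl]
      exact c_r15
    · -- `add ebx, 1`
      rw [w_rbx, ofNat_add_one]
    · rw [w_kept .r12 rfl]
      exact c_r12
    · rw [w_kept .r13 rfl]
      exact c_r13
    · rw [w_kept .r14 rfl]
      exact c_r14
  · -- 0x109865 … 0x109868 → `loop5`: `i = lim`, the next `l`
    have hk : Mem.SameExcept
        [⟨(ue.reg .rsp).toNat - 368, (ue.reg .rsp).toNat - 184⟩,
         ⟨(ue.reg .rsp).toNat - 136, (ue.reg .rsp).toNat - 132⟩,
         ⟨(ue.reg .rsp).toNat - 96, (ue.reg .rsp).toNat - 92⟩,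
         ⟨buf ue, buf ue + 4 * (n ue / 2)⟩] v.mem s_109868.mem := by
      rw [w_mem]
      exact Mem.SameExcept.refl _ _
    have hrbp : s_109868.reg .rbp = ue.reg .rsp - 8 := by
      rw [w_kept .rbp rfl]
      exact c_rbp
    have hrsp : s_109868.reg .rsp = ue.reg .rsp - 184 := by
      rw [w_kept .rsp rfl]
      exact c_rsp
    have habi : abiInv s_109868 := by v_inv
    obtain ⟨hb', hf'⟩ := seg6_carry hb hf hk w_eq habi hrbp hrsp
    refine ReachVia.done (Or.inr ?_)
    exact
      { rip := w_rip
        body := hb'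
        fixed := hf'
        r15 := w_r15
        lo := Nat.le_succ_of_le hin.1
        hi := Mdct.first_step hin }

/-- **The inner loop** (head `loop4`), by induction on the measure `lim l − i`: from the invariant at `(l, i)` to the outer head
`loop5` with `l + 1`. -/
theorem inner_loop (Lay : Layout) (hLay : Lay.hi = 0x1000000) (μ : Microarch) (hμ : UserX.MicroOK μ) (u₀ : State)
    (hcode : HasCodeNat Lay u₀ Vorbis.L.inverse_mdct.entry Vorbis.Code.code_inverse_mdct.nat Vorbis.L.inverse_mdct.size)
    (h_r : ∀ (others : List Obj) (frames : List (Nat × FrameLayout)) (len i0 koff k1 : Nat),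
      Calls Lay μ Vorbis.WayInv (Vorbis.conv u₀) Vorbis.L.imdct_step3_inner_r_loop.entry
        (Vorbis.Spec.imdct_step3_inner_r_loop.spec others frames len i0 koff k1))
    (others : List Obj) (frames : List (Nat × FrameLayout)) (len : Nat) (A : Arena) (stored room : Int) (ysz : Nat → Nat)
    (k c : Nat) (ue : State) (ret : Word) (l : Nat) :
    ∀ (m i : Nat) (v : State), Mdct.lim l - i = m →
      Inner u₀ others frames len A stored room ysz k c ue ret l i v →
      ReachVia Lay μ WayInv v (fun w => Outer u₀ others frames len A stored room ysz k c ue ret (l + 1) w) := by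
  intro m
  induction m with
  | zero =>
    intro i v hm hi
    apply ReachVia.trans (inner_step Lay hLay μ hμ u₀ hcode h_r others frames len A stored room ysz k c ue ret l i v hi)
    intro w hw
    rcases hw with hin | hout
    · -- impossible: `i = lim` already
      have := hin.ile
      omega
    · exact ReachVia.done hout
  | succ m ih =>
    intro i v hm hi
    apply ReachVia.trans (inner_step Lay hLay μ hμ u₀ hcode h_r others frames len A stored room ysz k c ue ret l i v hi)
    intro w hw
    rcases hw with hin | hout
    · exact ih (i + 1) w (by omega) hin
    · exact ReachVia.done hout

/-- **The outer loop** (head `loop5`), by induction on the measure `lmid k − l`: from the invariant at `l` to the segment's exit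
assertion `At7` at `loop7`. -/
theorem outer_loop (Lay : Layout) (hLay : Lay.hi = 0x1000000) (μ : Microarch) (hμ : UserX.MicroOK μ) (u₀ : State)
    (hcode : HasCodeNat Lay u₀ Vorbis.L.inverse_mdct.entry Vorbis.Code.code_inverse_mdct.nat Vorbis.L.inverse_mdct.size)
    (h_r : ∀ (others : List Obj) (frames : List (Nat × FrameLayout)) (len i0 koff k1 : Nat),
      Calls Lay μ Vorbis.WayInv (Vorbis.conv u₀) Vorbis.L.imdct_step3_inner_r_loop.entry
        (Vorbis.Spec.imdct_step3_inner_r_loop.spec others frames len i0 koff k1))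
    (others : List Obj) (frames : List (Nat × FrameLayout)) (len : Nat) (A : Arena) (stored room : Int) (ysz : Nat → Nat)
    (k c : Nat) (ue : State) (ret : Word) :
    ∀ (m l : Nat) (v : State), Mdct.lmid k - l = m →
      Outer u₀ others frames len A stored room ysz k c ue ret l v →
      ReachVia Lay μ WayInv v (fun w => At7 u₀ others frames len A stored room ysz k c ue ret w) := by
  intro m
  induction m with
  | zero =>
    intro l v hm ho
    apply ReachVia.trans (outer_step Lay hLay μ hμ u₀ hcode others frames len A stored room ysz k c ue ret l v ho)
    intro w hw
    rcases hw with hexit | hin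
    · exact ReachVia.done hexit
    · -- impossible: the guard gives `l + 1 ≤ lmid k`
      have := Mdct.first_step hin.guard
      omega
  | succ m ih =>
    intro l v hm ho
    apply ReachVia.trans (outer_step Lay hLay μ hμ u₀ hcode others frames len A stored room ysz k c ue ret l v ho)
    intro w hw
    rcases hw with hexit | hin
    · exact ReachVia.done hexit
    · -- the inner loop, then the next round
      apply ReachVia.trans
        (inner_loop Lay hLay μ hμ u₀ hcode h_r others frames len A stored room ysz k c ue ret l _ 0 w rfl hin)
      intro w' ho'
      exact ih (l + 1) w' (by omega) ho'

end Vorbis.Spec.inverse_mdct_6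

/-- Segment 6 of `inverse_mdct` (`loop5` … `loop7`: the first `l` loop of step 3 with its inner `i` loop around the call of
imdct_step3_inner_r_loop): from the assertion `At6` (`l = 2`) to the assertion `At7` (`l = lmid k`). -/
theorem Vorbis.Spec.Worked.inverse_mdct_6_ok : Vorbis.Spec.inverse_mdct_6.Statement := by
  intro Lay hLay μ hμ u₀ hcode h_r others frames len A stored room ysz k c ue ret v hat
  -- the outer invariant at `l = 2`
  have ho : Vorbis.Spec.inverse_mdct_6.Outer u₀ others frames len A stored room ysz k c ue ret 2 v :=
    { rip := hat.rip
      body := hat.body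
      fixed := Vorbis.Spec.inverse_mdct_6.Fixed.of_at6 hat
      r15 := Vorbis.Spec.inverse_mdct_6.reg_eq_of_toNat _ 2 hat.r15 (by decide)
      lo := Nat.le_refl 2
      hi := Nat.le_max_left 2 _ }
  exact Vorbis.Spec.inverse_mdct_6.outer_loop Lay hLay μ hμ u₀ hcode h_r others frames len A stored room ysz k c ue ret
    _ 2 v rfl ho
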